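-- pv_equiv track=rewrite | github.com/Agentic-Environmental-Engineering/GymVerse | gem/gem/envs/example/algorithm_AlgorithmicSorting_pipeline_arrangement_env_env.py | _is_stably_sorted
-- ===== SOURCE A (Python) =====
-- def _is_stably_sorted(seq_pairs: list) -> bool:
--     for i in range(len(seq_pairs) - 1):
--         v1, idx1 = seq_pairs[i]
--         v2, idx2 = seq_pairs[i + 1]
--         if v1 > v2:
--             return False
--         if v1 == v2 and idx1 > idx2:
--             return False
--     return True
-- ===== SOURCE B (Python) =====
-- def _is_stably_sorted(seq_pairs: list) -> bool:
--     return seq_pairs == sorted(seq_pairs)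
-- ===== Notes on version B (the rewrite author's own statement) =====
-- stated objective: simpler
-- what changed: B replaces A's indexed adjacent-pair scan with early returns by building sorted(seq_pairs) (lexicographic tuple order = value then index) and comparing it for equality with the input.
import Mathlib
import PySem

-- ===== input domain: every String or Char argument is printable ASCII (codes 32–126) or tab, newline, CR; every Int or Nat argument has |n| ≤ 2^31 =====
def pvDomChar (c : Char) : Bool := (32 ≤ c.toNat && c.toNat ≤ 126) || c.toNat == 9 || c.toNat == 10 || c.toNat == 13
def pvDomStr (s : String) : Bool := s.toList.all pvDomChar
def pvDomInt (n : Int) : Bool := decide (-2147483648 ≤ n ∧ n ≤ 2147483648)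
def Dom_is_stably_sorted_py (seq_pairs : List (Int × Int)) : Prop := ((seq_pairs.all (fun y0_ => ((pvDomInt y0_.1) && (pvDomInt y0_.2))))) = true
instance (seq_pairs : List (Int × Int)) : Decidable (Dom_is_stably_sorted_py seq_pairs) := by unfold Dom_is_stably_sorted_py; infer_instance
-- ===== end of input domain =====

-- B replaces A's adjacent-pair scan by comparing the input with its stably sorted version (simpler, not faster).


-- ===== PORT A =====
-- A walks adjacent pairs seq_pairs[i], seq_pairs[i+1] with two early-return tests;
-- ported as the obvious structural recursion over adjacent elements.
def is_stably_sorted_py : List (Int × Int) → Bool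
  | (v1, idx1) :: (v2, idx2) :: rest =>
      if v1 > v2 then false
      else if v1 = v2 ∧ idx1 > idx2 then false
      else is_stably_sorted_py ((v2, idx2) :: rest)
  | _ => true

-- ===== PORT B =====
-- B: seq_pairs == sorted(seq_pairs); Python's sorted on 2-tuples is sorted2 with the two projections.
def is_stably_sorted_py_alt (seq_pairs : List (Int × Int)) : Bool :=
  seq_pairs == PySem.List.sorted2 seq_pairs (fun p => p.1) (fun p => p.2)

-- ===== PRECONDITION & SPEC =====
def Spec_is_stably_sorted_py (seq_pairs : List (Int × Int)) (out : Bool) : Prop := out = is_stably_sorted_py_alt seq_pairs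
instance (seq_pairs : List (Int × Int)) (out : Bool) : Decidable (Spec_is_stably_sorted_py seq_pairs out) := by unfold Spec_is_stably_sorted_py; infer_instance

-- ===== CLAIM (what is proved, stated in full; the proofs are below) =====
def Claim_equal_is_stably_sorted_py : Prop := ∀ (seq_pairs : List (Int × Int)), Dom_is_stably_sorted_py seq_pairs → Spec_is_stably_sorted_py seq_pairs (is_stably_sorted_py seq_pairs)

-- ===== LEMMAS AND PROOFS =====

-- lexicographic ≤ on pairs: exactly the condition A's two guards test
def pvLexLe (p q : Int × Int) : Prop := p.1 < q.1 ∨ (p.1 = q.1 ∧ p.2 ≤ q.2)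

-- the comparison function sorted2 uses with reverse = false
def pvBefore (a b : Int × Int) : Bool :=
  decide (a.1 < b.1) || (!decide (b.1 < a.1) && decide (a.2 < b.2))

theorem pvSorted2_unfold (xs : List (Int × Int)) :
    PySem.List.sorted2 xs (fun p => p.1) (fun p => p.2) =
      xs.foldl (fun acc x => PySem.List.insertBy pvBefore x acc) [] := rfl

theorem pvBefore_false_iff (a b : Int × Int) : pvBefore b a = false ↔ pvLexLe a b := by
  simp [pvBefore, pvLexLe]; omega

theorem pvBefore_true_not (a b : Int × Int) (h : pvBefore a b = true) : pvLexLe a b := by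
  simp [pvBefore] at h; simp [pvLexLe]; omega

theorem pvLexLe_trans {a b c : Int × Int} (h1 : pvLexLe a b) (h2 : pvLexLe b c) : pvLexLe a c := by
  simp [pvLexLe] at *; omega

theorem pvA_true_iff_pairwise (xs : List (Int × Int)) :
    is_stably_sorted_py xs = true ↔ xs.Pairwise pvLexLe := by
  induction xs with
  | nil => simp [is_stably_sorted_py]
  | cons p t ih =>
    cases t with
    | nil => simp [is_stably_sorted_py]
    | cons q r =>
      obtain ⟨v1, i1⟩ := p; obtain ⟨v2, i2⟩ := q
      rw [is_stably_sorted_py]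
      constructor
      · intro h
        split_ifs at h with h1 h2
        have ht : ((v2, i2) :: r).Pairwise pvLexLe := (ih).mp h
        have hle : pvLexLe (v1, i1) (v2, i2) := by simp [pvLexLe]; omega
        refine List.Pairwise.cons ?_ ht
        intro z hz
        rcases List.mem_cons.mp hz with rfl | hz'
        · exact hle
        · exact pvLexLe_trans hle (List.rel_of_pairwise_cons ht hz')
      · intro h
        have h12 : pvLexLe (v1, i1) (v2, i2) :=
          List.rel_of_pairwise_cons h (List.mem_cons_self ..)
        have h1 : ¬ v1 > v2 := by simp [pvLexLe] at h12; omega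
        have h2 : ¬ (v1 = v2 ∧ i1 > i2) := by simp [pvLexLe] at h12; omega
        rw [if_neg h1, if_neg h2]
        exact ih.mpr h.tail

theorem pvInsert_pairwise (x : Int × Int) (acc : List (Int × Int))
    (h : acc.Pairwise pvLexLe) :
    (PySem.List.insertBy pvBefore x acc).Pairwise pvLexLe := by
  induction acc with
  | nil => simp [PySem.List.insertBy]
  | cons y ys ih =>
    rw [PySem.List.insertBy]
    split_ifs with hb
    · have hxy : pvLexLe x y := pvBefore_true_not x y hb
      refine List.Pairwise.cons ?_ h
      intro z hz
      rcases List.mem_cons.mp hz with rfl | hz'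
      · exact hxy
      · exact pvLexLe_trans hxy (List.rel_of_pairwise_cons h hz')
    · have hyx : pvLexLe y x := (pvBefore_false_iff y x).mp (by simpa using hb)
      refine List.Pairwise.cons ?_ (ih h.tail)
      intro z hz
      rcases (PySem.List.mem_insertBy pvBefore x z ys).mp hz with rfl | hz'
      · exact hyx
      · exact List.rel_of_pairwise_cons h hz'

theorem pvFoldl_insert_pairwise (xs acc : List (Int × Int)) (h : acc.Pairwise pvLexLe) :
    (xs.foldl (fun acc x => PySem.List.insertBy pvBefore x acc) acc).Pairwise pvLexLe := by
  induction xs generalizing acc with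
  | nil => simpa
  | cons x t ih => exact ih _ (pvInsert_pairwise x acc h)

theorem pvSorted2_pairwise (xs : List (Int × Int)) :
    (PySem.List.sorted2 xs (fun p => p.1) (fun p => p.2)).Pairwise pvLexLe := by
  rw [pvSorted2_unfold]
  exact pvFoldl_insert_pairwise xs [] (by simp)

theorem pvFoldl_insert_self (xs : List (Int × Int)) :
    ∀ acc : List (Int × Int), (∀ x ∈ xs, ∀ y ∈ acc, pvBefore x y = false) →
    xs.Pairwise pvLexLe →
    xs.foldl (fun acc x => PySem.List.insertBy pvBefore x acc) acc = acc ++ xs := by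
  induction xs with
  | nil => simp
  | cons x t ih =>
    intro acc hall hp
    have h1 : PySem.List.insertBy pvBefore x acc = acc ++ [x] :=
      PySem.List.insertBy_of_forall_not_before _ _ _
        (hall x (List.mem_cons_self ..))
    simp only [List.foldl_cons, h1]
    rw [ih (acc ++ [x]) ?_ hp.tail]
    · simp
    · intro z hz y hy
      rcases List.mem_append.mp hy with hy' | hy'
      · exact hall z (List.mem_cons_of_mem _ hz) y hy'
      · have : y = x := by simpa using hy'
        subst this
        exact (pvBefore_false_iff y z).mpr (List.rel_of_pairwise_cons hp hz)

theorem pvSorted2_eq_self (xs : List (Int × Int)) (h : xs.Pairwise pvLexLe) :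
    PySem.List.sorted2 xs (fun p => p.1) (fun p => p.2) = xs := by
  rw [pvSorted2_unfold, pvFoldl_insert_self xs [] (by simp) h]
  simp

-- ===== VERDICT (by name: the statement is the Claim_ definition above) =====
theorem is_stably_sorted_py_spec : Claim_equal_is_stably_sorted_py := by
  intro xs _
  unfold Spec_is_stably_sorted_py is_stably_sorted_py_alt
  by_cases h : xs.Pairwise pvLexLe
  · rw [(pvA_true_iff_pairwise xs).mpr h, pvSorted2_eq_self xs h]
    simp
  · have hA : is_stably_sorted_py xs = false := by
      rcases Bool.eq_false_or_eq_true (is_stably_sorted_py xs) with ht | hf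
      · exact absurd ((pvA_true_iff_pairwise xs).mp ht) h
      · exact hf
    rw [hA]
    symm
    rw [beq_eq_false_iff_ne]
    intro heq
    exact h (heq ▸ pvSorted2_pairwise xs)
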